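-- pv_equiv track=rewrite | github.com/umedkahhorov/mpi_processing | mpi_NormalizeSegy.py | get_chunk_boundry_indices
-- ===== SOURCE A (Python) =====
-- def get_chunk_boundry_indices(chunks: list[int]) -> list[list[int, int]]:
--     """
--     Calculate inclusive start/end indices for each chunk in each dimension.
--     """
--     chunk_indices = []
--     start = 0
--     for chunk_size in chunks:
--         end = start + chunk_size - 1
--         chunk_indices.append([start, end])
--         start = end + 1
--     return chunk_indices
-- ===== SOURCE B (Python) =====
-- def get_chunk_boundry_indices(chunks: list[int]) -> list[list[int, int]]:
--     """
--     Calculate inclusive start/end indices for each chunk in each dimension.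
--     Prefix-sum table build, then a separate pairing pass.
--     """
--     ends = []
--     total = 0
--     for c in chunks:
--         total += c
--         ends.append(total)
--     starts = [0] + ends[:-1]
--     return [[s, e - 1] for s, e in zip(starts, ends)]
-- ===== Notes on version B (the rewrite author's own statement) =====
-- stated objective: alternative
-- what changed: Replaces A's single loop threading a running start/end accumulator into the output with a two-phase decomposition: first build the prefix-sum table of chunk sizes (the exclusive ends), then pair each end with the previous end (shifted by one) in a separate zip pass.
import Mathlib
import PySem

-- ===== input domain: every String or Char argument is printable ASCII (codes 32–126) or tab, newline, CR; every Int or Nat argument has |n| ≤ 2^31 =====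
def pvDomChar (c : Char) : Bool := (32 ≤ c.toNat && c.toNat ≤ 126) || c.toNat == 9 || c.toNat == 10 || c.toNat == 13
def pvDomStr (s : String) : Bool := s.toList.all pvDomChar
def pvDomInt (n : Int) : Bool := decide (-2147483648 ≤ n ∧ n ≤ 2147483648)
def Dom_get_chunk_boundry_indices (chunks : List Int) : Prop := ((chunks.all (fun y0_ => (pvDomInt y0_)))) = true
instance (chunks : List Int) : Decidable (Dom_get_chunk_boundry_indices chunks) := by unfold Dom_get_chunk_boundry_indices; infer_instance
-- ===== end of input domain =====

-- ===== PORT A =====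
-- B changes: builds the prefix-sum table first, then pairs ends in a second pass (alternative decomposition).
def get_chunk_boundry_indices (chunks : List Int) : List (List Int) :=
  (chunks.foldl (fun (st : List (List Int) × Int) chunk_size =>
      let «end» := st.2 + chunk_size - 1
      (st.1 ++ [[st.2, «end»]], «end» + 1))
    ([], 0)).1

-- ===== PORT B =====
-- prefix-sum table ('ends' loop of Source B)
def pvEnds : List Int → Int → List Int
  | [], _ => []
  | c :: rest, total => (total + c) :: pvEnds rest (total + c)

def get_chunk_boundry_indices_alt (chunks : List Int) : List (List Int) :=
  let ends := pvEnds chunks 0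
  let starts := 0 :: ends.dropLast   -- [0] + ends[:-1]
  (starts.zip ends).map (fun p => [p.1, p.2 - 1])

-- ===== PRECONDITION & SPEC =====
def Spec_get_chunk_boundry_indices (chunks : List Int) (out : List (List Int)) : Prop := out = get_chunk_boundry_indices_alt chunks
instance (chunks : List Int) (out : List (List Int)) : Decidable (Spec_get_chunk_boundry_indices chunks out) := by unfold Spec_get_chunk_boundry_indices; infer_instance

-- ===== CLAIM (what is proved, stated in full; the proofs are below) =====
def Claim_equal_get_chunk_boundry_indices : Prop := ∀ (chunks : List Int), Dom_get_chunk_boundry_indices chunks → Spec_get_chunk_boundry_indices chunks (get_chunk_boundry_indices chunks)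

-- ===== LEMMAS AND PROOFS =====

-- both programs compute this direct recursion from a running start
def pvGo : List Int → Int → List (List Int)
  | [], _ => []
  | c :: rest, s => [s, s + c - 1] :: pvGo rest (s + c)

theorem pvA_eq_go (chunks : List Int) : ∀ (acc : List (List Int)) (s : Int),
    (chunks.foldl (fun (st : List (List Int) × Int) chunk_size =>
        let «end» := st.2 + chunk_size - 1
        (st.1 ++ [[st.2, «end»]], «end» + 1))
      (acc, s)).1 = acc ++ pvGo chunks s := by
  induction chunks with
  | nil => intro acc s; simp [pvGo]
  | cons c rest ih =>
    intro acc s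
    simp only [List.foldl_cons, pvGo]
    rw [show s + c - 1 + 1 = s + c by ring, ih]
    simp

theorem pvZip_dropLast (e : Int) (E : List Int) :
    ((e :: E).dropLast).zip E = (e :: E.dropLast).zip E := by
  cases E <;> simp

theorem pvB_eq_go (chunks : List Int) : ∀ (t : Int),
    ((t :: (pvEnds chunks t).dropLast).zip (pvEnds chunks t)).map
      (fun p => [p.1, p.2 - 1]) = pvGo chunks t := by
  induction chunks with
  | nil => intro t; simp [pvEnds, pvGo]
  | cons c rest ih =>
    intro t
    simp only [pvEnds, pvGo, List.zip_cons_cons, List.map_cons, pvZip_dropLast]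
    rw [ih (t + c)]

-- ===== VERDICT (by name: the statement is the Claim_ definition above) =====
theorem get_chunk_boundry_indices_spec : Claim_equal_get_chunk_boundry_indices := by
  intro chunks _
  unfold Spec_get_chunk_boundry_indices get_chunk_boundry_indices get_chunk_boundry_indices_alt
  rw [pvA_eq_go chunks [] 0, pvB_eq_go chunks 0]
  simp
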